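-- pv_equiv track=rewrite | github.com/madofficer/algorithms | Algorithms_n_DataStructures/two_ptrs/CoprimeRange.py | findMinimumLength
-- ===== SOURCE A (Python) =====
-- import math
--
-- def findMinimumLength(a):
--     n = len(a)
--     dp = [[0] * n for _ in range(n)]
--
--     gcd = a[0]
--     for i in range(1, n):
--         gcd = math.gcd(gcd, a[i])
--
--     if gcd != 1:
--         return -1
--
--     for i in range(n):
--         dp[i][i] = 1
--
--     for length in range(2, n + 1):
--         for i in range(n - length + 1):
--             j = i + length - 1
--             g = math.gcd(a[i], a[j])
--             if g == 1:
--                 dp[i][j] = 2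
--             else:
--                 dp[i][j] = float('inf')
--                 for k in range(i, j):
--                     dp[i][j] = min(dp[i][j], dp[i][k] + dp[k + 1][j])
--
--     return dp[0][n - 1]
-- ===== SOURCE B (Python) =====
-- import math
--
-- def findMinimumLength(a):
--     n = len(a)
--     g = 0
--     for x in a:
--         g = math.gcd(g, x)
--     if g != 1:
--         return -1
--     # f[t] = minimal cost to cover prefix a[0:t]; blocks are singletons (cost 1)
--     # or segments with coprime endpoints (cost 2)
--     f = [0] * (n + 1)
--     for j in range(n):
--         best = f[j] + 1
--         for l in range(j):
--             if math.gcd(a[l], a[j]) == 1: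
--                 if f[l] + 2 < best:
--                     best = f[l] + 2
--         f[j + 1] = best
--     return f[n]
-- ===== Notes on version B (the rewrite author's own statement) =====
-- stated objective: faster
-- what changed: Replaces A's O(n^3) interval DP dp[i][j] over all split points by a one-dimensional prefix DP f[t] whose last block is either a singleton (cost 1) or a segment [l..j] with coprime endpoints (cost 2), giving O(n^2) gcd computations instead of O(n^3) cells-with-inner-scan.
-- intended difference: On the single-element list [-1], A returns -1 because it tests its raw first element against 1 instead of the gcd, while B returns 1, the intended value: gcd(-1) = 1 and the one-block partition has length 1. — e.g. on findMinimumLength([-1]): A returns -1, B returns 1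
import Mathlib
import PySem

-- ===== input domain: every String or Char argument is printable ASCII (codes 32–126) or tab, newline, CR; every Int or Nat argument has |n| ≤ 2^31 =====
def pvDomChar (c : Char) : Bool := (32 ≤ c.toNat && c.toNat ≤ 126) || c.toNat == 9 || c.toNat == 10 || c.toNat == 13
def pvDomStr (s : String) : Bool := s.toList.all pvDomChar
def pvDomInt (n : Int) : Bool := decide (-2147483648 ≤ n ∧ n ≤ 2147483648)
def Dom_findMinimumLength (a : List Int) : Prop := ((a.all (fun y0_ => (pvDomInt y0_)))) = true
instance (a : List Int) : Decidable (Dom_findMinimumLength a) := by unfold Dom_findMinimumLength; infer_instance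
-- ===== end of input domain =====

-- B replaces A's O(n^3) interval DP over segments by a one-dimensional prefix DP
-- (last block is a singleton or a coprime-endpoint segment), measurably faster.

-- ===== PORT A =====
-- dp is Python's n×n list of lists; mget/mset are a[i][j] reads/writes (indices are
-- always in range where A uses them, so List.getD/List.set are exact here).
def mget (m : List (List Int)) (i j : Nat) : Int := (m.getD i []).getD j 0
def mset (m : List (List Int)) (i j : Nat) (x : Int) : List (List Int) :=
  m.set i ((m.getD i []).set j x)
-- Python's dp[i][j] = float('inf'); then min(...): none plays inf; the k-loop is
-- nonempty whenever the cell is written (length ≥ 2), so the inf never survives.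
def minOpt (m : Option Int) (x : Int) : Option Int :=
  some (match m with | none => x | some y => min y x)

def findMinimumLength (a : List Int) : Int :=
  let n := a.length
  let dp0 : List (List Int) := List.replicate n (List.replicate n 0)
  -- gcd loop over range(1, n); Python's reads are in range (Pre_ excludes the empty list)
  let g : Int := (List.range' 1 (n - 1)).foldl (fun g i => (Int.gcd g (a.getD i 0) : Int)) (a.getD 0 0)
  if g ≠ 1 then -1
  else
    let dp1 := (List.range n).foldl (fun dp i => mset dp i i 1) dp0
    let dp2 := (List.range' 2 (n - 1)).foldl (fun dp len =>
        (List.range (n - len + 1)).foldl (fun dp i =>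
          let j := i + len - 1
          if (Int.gcd (a.getD i 0) (a.getD j 0) : Int) = 1 then mset dp i j 2
          else
            let m := (List.range' i (j - i)).foldl
                (fun m k => minOpt m (mget dp i k + mget dp (k + 1) j)) none
            mset dp i j (m.getD 0)) dp) dp1
    mget dp2 0 (n - 1)

-- ===== PORT B =====
def findMinimumLength_alt (a : List Int) : Int :=
  let n := a.length
  let g : Int := a.foldl (fun g x => (Int.gcd g x : Int)) 0
  if g ≠ 1 then -1
  else
    -- f[t] = minimal cost of the prefix a[0:t]; f = [0]*(n+1)
    let f := (List.range n).foldl (fun f j =>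
      let best := f.getD j 0 + 1
      let best := (List.range j).foldl (fun best l =>
        if (Int.gcd (a.getD l 0) (a.getD j 0) : Int) = 1 then
          (if f.getD l 0 + 2 < best then f.getD l 0 + 2 else best)
        else best) best
      f.set (j + 1) best) (List.replicate (n + 1) 0)
    f.getD n 0

-- ===== PRECONDITION & SPEC =====
-- Pre_ excludes only the empty list, on which A raises IndexError reading the first element.
def Pre_findMinimumLength (a : List Int) : Prop := a ≠ []
instance (a : List Int) : Decidable (Pre_findMinimumLength a) := by
  unfold Pre_findMinimumLength; infer_instance
def pvWitness_findMinimumLength : List Int := [1]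

-- On the single-element list [-1], A tests the raw first element against 1 instead of
-- its gcd and returns -1, while B returns 1, the intended answer: gcd(-1) = 1 and the
-- one-element partition has length 1.
def D_findMinimumLength (a : List Int) : Prop := a = [-1]
instance (a : List Int) : Decidable (D_findMinimumLength a) := by
  unfold D_findMinimumLength; infer_instance

def Spec_findMinimumLength (a : List Int) (out : Int) : Prop :=
  ¬ D_findMinimumLength a → out = findMinimumLength_alt a
instance (a : List Int) (out : Int) : Decidable (Spec_findMinimumLength a out) := by
  unfold Spec_findMinimumLength; infer_instance

def pvDiffWitness_findMinimumLength : List Int := [-1]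
def pvDiffWitnessOut_findMinimumLength : Int × Int := (-1, 1)

-- ===== CLAIM (what is proved, stated in full; the proofs are below) =====
def Claim_unchanged_findMinimumLength : Prop := ∀ (a : List Int), Dom_findMinimumLength a → Pre_findMinimumLength a → Spec_findMinimumLength a (findMinimumLength a)
def Claim_changed_findMinimumLength : Prop := Dom_findMinimumLength (pvDiffWitness_findMinimumLength) ∧ Pre_findMinimumLength (pvDiffWitness_findMinimumLength) ∧ D_findMinimumLength (pvDiffWitness_findMinimumLength) ∧ findMinimumLength (pvDiffWitness_findMinimumLength) = pvDiffWitnessOut_findMinimumLength.1 ∧ findMinimumLength_alt (pvDiffWitness_findMinimumLength) = pvDiffWitnessOut_findMinimumLength.2 ∧ pvDiffWitnessOut_findMinimumLength.1 ≠ pvDiffWitnessOut_findMinimumLength.2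
def Claim_exact_findMinimumLength : Prop := ∀ (a : List Int), Dom_findMinimumLength a → Pre_findMinimumLength a → D_findMinimumLength a → findMinimumLength a ≠ findMinimumLength_alt a

-- ===== LEMMAS AND PROOFS =====

-- The common specification of both DPs: OPT v i j is the minimal total cost of
-- cutting the index interval [i, j] into blocks, a singleton block costing 1 and a
-- block [l, r] with l < r and gcd(v l, v r) = 1 costing 2, expressed by recursion on
-- the LAST block (which either is the singleton {j}, or is some [l, j] with
-- gcd(v l, v j) = 1).
def OPT (v : Nat → Int) (i j : Nat) : Int :=
  if _h : j ≤ i then 1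
  else
    (((List.range' i (j - i)).filter (fun l => Int.gcd (v l) (v j) == 1)).attach).foldl
      (fun m x => min m ((if x.1 = i then 0 else OPT v i (x.1 - 1)) + 2))
      (OPT v i (j - 1) + 1)
termination_by j
decreasing_by
  all_goals first
    | (have hm := List.mem_range'_1.mp (List.mem_filter.mp x.2).1; omega)
    | omega

-- the cost of a candidate last block [l, j]
def cand (v : Nat → Int) (i l : Nat) : Int := (if l = i then 0 else OPT v i (l - 1)) + 2

lemma OPT_diag (v : Nat → Int) (i j : Nat) (h : j ≤ i) : OPT v i j = 1 := by
  rw [OPT]; simp [h]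

lemma OPT_eq (v : Nat → Int) (i j : Nat) (h : i < j) :
    OPT v i j = ((List.range' i (j - i)).filter (fun l => Int.gcd (v l) (v j) == 1)).foldl
      (fun m l => min m (cand v i l)) (OPT v i (j - 1) + 1) := by
  rw [OPT, dif_neg (by omega)]
  simp only [cand]
  exact List.foldl_attach
    (f := fun m l => min m ((if l = i then 0 else OPT v i (l - 1)) + 2))
    (b := OPT v i (j - 1) + 1)

-- generic facts about a foldl-min loop
lemma foldl_min_le_init {α : Type} (g : α → Int) (b : Int) (L : List α) :
    L.foldl (fun m x => min m (g x)) b ≤ b := by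
  induction L generalizing b with
  | nil => simp
  | cons y L ih => exact le_trans (ih (min b (g y))) (min_le_left _ _)

lemma foldl_min_le_mem {α : Type} (g : α → Int) (b : Int) {L : List α} {x : α} (hx : x ∈ L) :
    L.foldl (fun m x => min m (g x)) b ≤ g x := by
  induction L generalizing b with
  | nil => cases hx
  | cons y L ih =>
    rcases List.mem_cons.mp hx with h | h
    · subst h
      exact le_trans (foldl_min_le_init g (min b (g x)) L) (min_le_right _ _)
    · exact ih (min b (g y)) h

lemma le_foldl_min {α : Type} (g : α → Int) (b c : Int) (L : List α)
    (hb : c ≤ b) (h : ∀ x ∈ L, c ≤ g x) : c ≤ L.foldl (fun m x => min m (g x)) b := by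
  induction L generalizing b with
  | nil => simpa using hb
  | cons y L ih =>
    exact ih (min b (g y)) (le_min hb (h y (List.mem_cons_self)))
      (fun x hx => h x (List.mem_cons_of_mem _ hx))

lemma foldl_min_cases {α : Type} (g : α → Int) (b : Int) (L : List α) :
    L.foldl (fun m x => min m (g x)) b = b ∨ ∃ x ∈ L, L.foldl (fun m x => min m (g x)) b = g x := by
  induction L generalizing b with
  | nil => exact Or.inl rfl
  | cons y L ih =>
    rcases ih (min b (g y)) with h | ⟨x, hx, hfx⟩
    · simp only [List.foldl_cons, h]
      rcases le_total b (g y) with hb | hb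
      · exact Or.inl (min_eq_left hb)
      · exact Or.inr ⟨y, List.mem_cons_self, min_eq_right hb⟩
    · exact Or.inr ⟨x, List.mem_cons_of_mem _ hx, hfx⟩

lemma OPT_pos (v : Nat → Int) (i j : Nat) : 1 ≤ OPT v i j := by
  induction j using Nat.strong_induction_on with
  | _ j ih =>
    by_cases h : j ≤ i
    · rw [OPT_diag v i j h]
    · rw [OPT_eq v i j (by omega)]
      refine le_foldl_min _ _ _ _ ?_ ?_
      · have := ih (j - 1) (by omega)
        omega
      · intro x hx
        have hxr := List.mem_range'_1.mp (List.mem_filter.mp hx).1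
        unfold cand
        by_cases hxi : x = i
        · simp [hxi]
        · have := ih (x - 1) (by omega)
          simp only [if_neg hxi]
          omega

lemma OPT_le_two (v : Nat → Int) (i j : Nat) (h : i < j) (hc : Int.gcd (v i) (v j) = 1) :
    OPT v i j ≤ 2 := by
  rw [OPT_eq v i j h]
  have hmem : i ∈ (List.range' i (j - i)).filter (fun l => Int.gcd (v l) (v j) == 1) :=
    List.mem_filter.mpr ⟨List.mem_range'_1.mpr ⟨le_refl i, by omega⟩, by simp [hc]⟩
  have := foldl_min_le_mem (cand v i) (OPT v i (j - 1) + 1) hmem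
  simpa [cand] using this

lemma OPT_ge_two (v : Nat → Int) (i j : Nat) (h : i < j) : 2 ≤ OPT v i j := by
  rw [OPT_eq v i j h]
  refine le_foldl_min _ _ _ _ ?_ ?_
  · have := OPT_pos v i (j - 1)
    omega
  · intro x hx
    unfold cand
    by_cases hxi : x = i
    · simp [hxi]
    · have := OPT_pos v i (x - 1)
      simp only [if_neg hxi]
      omega

lemma OPT_concat (v : Nat → Int) (i : Nat) :
    ∀ j k : Nat, i ≤ k → k < j → OPT v i j ≤ OPT v i k + OPT v (k + 1) j := by
  intro j
  induction j using Nat.strong_induction_on with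
  | _ j ih =>
    intro k hik hkj
    have hij : i < j := lt_of_le_of_lt hik hkj
    have hA : OPT v i j ≤ OPT v i (j - 1) + 1 := by
      rw [OPT_eq v i j hij]; exact foldl_min_le_init _ _ _
    by_cases hkj1 : k + 1 = j
    · rw [hkj1, OPT_diag v j j le_rfl]
      have hk : k = j - 1 := by omega
      rw [hk]; exact hA
    · have h2 : k + 1 < j := by omega
      have hOPT := OPT_eq v (k + 1) j h2
      rcases foldl_min_cases (cand v (k + 1)) (OPT v (k + 1) (j - 1) + 1)
          ((List.range' (k + 1) (j - (k + 1))).filter (fun l => Int.gcd (v l) (v j) == 1)) with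
        hc | ⟨l, hl, hfl⟩
      · rw [hOPT, hc]
        have hB := ih (j - 1) (by omega) k hik (by omega)
        have hA' : OPT v i (j - 1) + 1 ≤ OPT v i k + OPT v (k + 1) (j - 1) + 1 := by omega
        calc OPT v i j ≤ OPT v i (j - 1) + 1 := hA
          _ ≤ OPT v i k + (OPT v (k + 1) (j - 1) + 1) := by omega
      · have hlr := List.mem_range'_1.mp (List.mem_filter.mp hl).1
        have hlcop := (List.mem_filter.mp hl).2
        have hlne : l ≠ i := by omega
        have hmem : l ∈ (List.range' i (j - i)).filter (fun l => Int.gcd (v l) (v j) == 1) :=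
          List.mem_filter.mpr ⟨List.mem_range'_1.mpr ⟨by omega, by omega⟩, hlcop⟩
        have hA2 : OPT v i j ≤ OPT v i (l - 1) + 2 := by
          rw [OPT_eq v i j hij]
          have := foldl_min_le_mem (cand v i) (OPT v i (j - 1) + 1) hmem
          simpa [cand, if_neg hlne] using this
        rw [hOPT, hfl]
        by_cases hlk : l = k + 1
        · simp only [cand, if_pos hlk]
          have hh : l - 1 = k := by omega
          rw [hh] at hA2
          omega
        · have hB := ih (l - 1) (by omega) k hik (by omega)
          simp only [cand, if_neg hlk]
          omega

lemma OPT_split_exists (v : Nat → Int) (i j : Nat) (h : i < j)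
    (hnc : Int.gcd (v i) (v j) ≠ 1) :
    ∃ k, i ≤ k ∧ k < j ∧ OPT v i k + OPT v (k + 1) j ≤ OPT v i j := by
  rcases foldl_min_cases (cand v i) (OPT v i (j - 1) + 1)
      ((List.range' i (j - i)).filter (fun l => Int.gcd (v l) (v j) == 1)) with
    hc | ⟨l, hl, hfl⟩
  · refine ⟨j - 1, by omega, by omega, ?_⟩
    have hv : OPT v i j = OPT v i (j - 1) + 1 := by rw [OPT_eq v i j h]; exact hc
    rw [show j - 1 + 1 = j by omega] at *
    rw [OPT_diag v j j le_rfl]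
    omega
  · have hlr := List.mem_range'_1.mp (List.mem_filter.mp hl).1
    have hlcop : Int.gcd (v l) (v j) = 1 := by
      have := (List.mem_filter.mp hl).2
      simpa using this
    have hlne : l ≠ i := fun he => hnc (he ▸ hlcop)
    have hv : OPT v i j = OPT v i (l - 1) + 2 := by
      rw [OPT_eq v i j h, hfl]
      simp [cand, if_neg hlne]
    have hle2 : OPT v l j ≤ 2 := OPT_le_two v l j (by omega) hlcop
    refine ⟨l - 1, by omega, by omega, ?_⟩
    rw [show l - 1 + 1 = l by omega]
    omega

lemma minOpt_foldl (g : Nat → Int) (L : List Nat) (b : Int) :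
    L.foldl (fun m k => minOpt m (g k)) (some b) =
      some (L.foldl (fun m k => min m (g k)) b) := by
  induction L generalizing b with
  | nil => rfl
  | cons y L ih => simpa [minOpt] using ih (min b (g y))

-- the value of A's inner k-loop (a min over all splits) is exactly OPT v i j
lemma split_fold_eq (v : Nat → Int) (i j : Nat) (h : i < j)
    (hnc : Int.gcd (v i) (v j) ≠ 1) (g : Nat → Int)
    (hg : ∀ k, i ≤ k → k < j → g k = OPT v i k + OPT v (k + 1) j) :
    (((List.range' i (j - i)).foldl (fun m k => minOpt m (g k)) none).getD 0) = OPT v i j := by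
  have hsplit : List.range' i (j - i) = i :: List.range' (i + 1) (j - i - 1) := by
    rw [show j - i = (j - i - 1) + 1 by omega, List.range'_succ]
    norm_num
  rw [hsplit]
  simp only [List.foldl_cons, show minOpt none (g i) = some (g i) from rfl,
    minOpt_foldl, Option.getD_some]
  have hgk : ∀ k, k ∈ List.range' (i + 1) (j - i - 1) → g k = OPT v i k + OPT v (k + 1) j := by
    intro k hk
    have := List.mem_range'_1.mp hk
    exact hg k (by omega) (by omega)
  have hgi : g i = OPT v i i + OPT v (i + 1) j := hg i le_rfl h
  apply le_antisymm
  · rcases OPT_split_exists v i j h hnc with ⟨k, hik, hkj, hkle⟩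
    by_cases hki : k = i
    · rw [hki] at hkle
      calc List.foldl (fun m k => min m (g k)) (g i) (List.range' (i + 1) (j - i - 1)) ≤ g i :=
            foldl_min_le_init _ _ _
        _ ≤ OPT v i j := by rw [hgi]; exact hkle
    · have hkm : k ∈ List.range' (i + 1) (j - i - 1) := List.mem_range'_1.mpr ⟨by omega, by omega⟩
      calc List.foldl (fun m k => min m (g k)) (g i) (List.range' (i + 1) (j - i - 1)) ≤ g k :=
            foldl_min_le_mem _ _ hkm
        _ ≤ OPT v i j := by rw [hgk k hkm]; exact hkle
  · rcases foldl_min_cases g (g i) (List.range' (i + 1) (j - i - 1)) with hc | ⟨k, hk, hfk⟩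
    · rw [hc, hgi]
      exact OPT_concat v i j i le_rfl h
    · rw [hfk, hgk k hk]
      have := List.mem_range'_1.mp hk
      exact OPT_concat v i j k (by omega) (by omega)

-- === table lemmas ===
lemma mset_length (m : List (List Int)) (i j : Nat) (x : Int) :
    (mset m i j x).length = m.length := by
  simp [mset]

lemma mset_row_length (m : List (List Int)) (i j : Nat) (x : Int) (i' : Nat) :
    ((mset m i j x).getD i' []).length = (m.getD i' []).length := by
  unfold mset
  by_cases hii : i = i'
  · subst hii
    by_cases hlen : i < m.length
    · simp [List.getD_eq_getElem?_getD, hlen]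
    · rw [List.set_eq_of_length_le (by omega)]
  · simp [List.getD_eq_getElem?_getD, List.getElem?_set_ne, hii]

lemma mget_mset_self (m : List (List Int)) (i j : Nat) (x : Int)
    (hi : i < m.length) (hj : j < (m.getD i []).length) :
    mget (mset m i j x) i j = x := by
  unfold mget mset
  rw [show (m.set i ((m.getD i []).set j x)).getD i [] = (m.getD i []).set j x by
    simp [List.getD_eq_getElem?_getD, hi]]
  rw [List.getD_eq_getElem?_getD] at hj ⊢
  simp [hj]

lemma mget_mset_ne (m : List (List Int)) (i j : Nat) (x : Int) (i' j' : Nat)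
    (h : i ≠ i' ∨ j ≠ j') : mget (mset m i j x) i' j' = mget m i' j' := by
  unfold mget mset
  by_cases hii : i = i'
  · subst hii
    have hjj : j ≠ j' := by tauto
    by_cases hlen : i < m.length
    · rw [show (m.set i ((m.getD i []).set j x)).getD i [] = (m.getD i []).set j x by
        simp [List.getD_eq_getElem?_getD, hlen]]
      simp [List.getD_eq_getElem?_getD, List.getElem?_set_ne, hjj]
    · rw [List.set_eq_of_length_le (by omega)]
  · simp [List.getD_eq_getElem?_getD, List.getElem?_set_ne, hii]

-- generic loop-invariant principle for a foldl over range'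
lemma foldl_inv {σ : Type} (P : Nat → σ → Prop) (f : σ → Nat → σ) (s t : Nat)
    (step : ∀ k st, s ≤ k → k < s + t → P k st → P (k + 1) (f st k)) :
    ∀ st, P s st → P (s + t) (List.foldl f st (List.range' s t)) := by
  induction t generalizing s with
  | zero => intro st h; simpa using h
  | succ t ih =>
    intro st h
    rw [List.range'_succ, List.foldl_cons]
    have := ih (s + 1) (fun k st' hk1 hk2 hp => step k st' (by omega) (by omega) hp)
      (f st s) (step s st le_rfl (by omega) h)
    rw [show s + (t + 1) = s + 1 + t by omega]
    exact this

-- === invariants of A's table ===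
def va (a : List Int) : Nat → Int := fun k => a.getD k 0

def InvA (a : List Int) (L : Nat) (m : List (List Int)) : Prop :=
  m.length = a.length ∧ (∀ i, i < a.length → (m.getD i []).length = a.length) ∧
  ∀ i j, i < a.length → j < a.length →
    mget m i j = if i ≤ j ∧ j < i + L then OPT (va a) i j else 0

lemma diag_loop (a : List Int) :
    InvA a 1 ((List.range a.length).foldl (fun dp i => mset dp i i 1)
      (List.replicate a.length (List.replicate a.length 0))) := by
  have main := foldl_inv
    (P := fun t m => m.length = a.length ∧ (∀ i, i < a.length → (m.getD i []).length = a.length) ∧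
      ∀ i j, i < a.length → j < a.length → mget m i j = if i = j ∧ i < t then 1 else 0)
    (f := fun dp i => mset dp i i 1) 0 a.length
    (by
      intro k st hk0 hkn ⟨hl, hr, hm⟩
      refine ⟨by rw [mset_length]; exact hl, fun i hi => by rw [mset_row_length]; exact hr i hi, ?_⟩
      intro i j hi hj
      by_cases hij : i = k ∧ j = k
      · rw [hij.1, hij.2, mget_mset_self st k k 1 (by omega) (by rw [hr k (by omega)]; omega)]
        simp
      · rw [mget_mset_ne st k k 1 i j (by tauto), hm i j hi hj]
        split_ifs with h1 h2 h2
        · rfl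
        · exact absurd ⟨h1.1, by omega⟩ h2
        · exfalso
          rcases h2 with ⟨he, hlt⟩
          have hnk : ¬ i < k := fun hh => h1 ⟨he, hh⟩
          have hik : i = k := by omega
          exact hij ⟨hik, he ▸ hik⟩
        · rfl)
    (List.replicate a.length (List.replicate a.length 0))
    ⟨by simp, fun i hi => by simp [List.getD_eq_getElem?_getD, hi],
      fun i j hi hj => by simp [mget, List.getD_eq_getElem?_getD, hi, hj]⟩
  rw [List.range_eq_range']
  simp only [Nat.zero_add] at main
  obtain ⟨hl, hr, hm⟩ := main
  refine ⟨hl, hr, ?_⟩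
  intro i j hi hj
  rw [hm i j hi hj]
  by_cases hij : i = j
  · subst hij
    simp [hi, OPT_diag (va a) i i le_rfl]
  · have h1 : ¬ (i = j ∧ i < a.length) := by tauto
    have h2 : ¬ (i ≤ j ∧ j < i + 1) := by omega
    rw [if_neg h1, if_neg h2]

def InnerInv (a : List Int) (L t : Nat) (m : List (List Int)) : Prop :=
  m.length = a.length ∧ (∀ i, i < a.length → (m.getD i []).length = a.length) ∧
  ∀ i j, i < a.length → j < a.length →
    mget m i j = if (i ≤ j ∧ j + 1 < i + L) ∨ (j + 1 = i + L ∧ i < t) then OPT (va a) i j else 0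

lemma inner_step (a : List Int) (L : Nat) (hL2 : 2 ≤ L) (hLn : L ≤ a.length)
    (t : Nat) (ht : t < a.length - L + 1) (dp : List (List Int))
    (hI : InnerInv a L t dp) :
    InnerInv a L (t + 1)
      ((fun dp i =>
          let j := i + L - 1
          if (Int.gcd (a.getD i 0) (a.getD j 0) : Int) = 1 then mset dp i j 2
          else
            let mo := (List.range' i (j - i)).foldl
                (fun mo k => minOpt mo (mget dp i k + mget dp (k + 1) j)) none
            mset dp i j (mo.getD 0)) dp t) := by
  obtain ⟨hl, hr, hm⟩ := hI
  set n := a.length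
  set j := t + L - 1 with hj
  have hjn : j < n := by omega
  have htj : t < j := by omega
  have htn : t < n := by omega
  have hval : ∀ (x : Int),
      x = OPT (va a) t j →
      InnerInv a L (t + 1) (mset dp t j x) := by
    intro x hx
    refine ⟨by rw [mset_length]; exact hl, fun i hi => by rw [mset_row_length]; exact hr i hi, ?_⟩
    intro i j' hi hj'
    by_cases hij : i = t ∧ j' = j
    · rw [hij.1, hij.2, mget_mset_self dp t j x (by omega) (by rw [hr t htn]; omega)]
      rw [hx, if_pos (Or.inr ⟨by omega, by omega⟩)]
    · rw [mget_mset_ne dp t j x i j' (by tauto)]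
      rw [hm i j' hi hj']
      congr 1
      rw [eq_iff_iff]
      constructor
      · rintro (h | h)
        · exact Or.inl h
        · exact Or.inr ⟨h.1, by omega⟩
      · rintro (h | h)
        · exact Or.inl h
        · refine Or.inr ⟨h.1, ?_⟩
          rcases Nat.lt_succ_iff_lt_or_eq.mp h.2 with h2 | h2
          · exact h2
          · exfalso; exact hij ⟨h2, by omega⟩
  simp only []
  by_cases hc : (Int.gcd (a.getD t 0) (a.getD (t + L - 1) 0) : Int) = 1
  · rw [if_pos hc]
    apply hval
    have hcop : Int.gcd (va a t) (va a j) = 1 := by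
      have := hc
      rw [← hj] at this
      exact_mod_cast this
    exact (le_antisymm (OPT_le_two (va a) t j htj hcop) (OPT_ge_two (va a) t j htj)).symm
  · rw [if_neg hc]
    apply hval
    have hcop : Int.gcd (va a t) (va a j) ≠ 1 := by
      intro hh
      apply hc
      rw [← hj]
      exact_mod_cast hh
    rw [← hj]
    refine split_fold_eq (va a) t j htj hcop
      (fun k => mget dp t k + mget dp (k + 1) j) ?_
    intro k hk1 hk2
    simp only []
    rw [hm t k htn (by omega), hm (k + 1) j (by omega) hjn,
      if_pos (Or.inl ⟨hk1, by omega⟩), if_pos (Or.inl ⟨by omega, by omega⟩)]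

lemma InvA_to_inner (a : List Int) (L : Nat) (hL : 2 ≤ L) (m : List (List Int))
    (h : InvA a (L - 1) m) : InnerInv a L 0 m := by
  obtain ⟨hl, hr, hm⟩ := h
  refine ⟨hl, hr, fun i j hi hj => ?_⟩
  rw [hm i j hi hj]
  exact if_congr (by omega) rfl rfl

lemma inner_to_InvA (a : List Int) (L : Nat) (hL2 : 2 ≤ L) (hLn : L ≤ a.length)
    (m : List (List Int)) (h : InnerInv a L (a.length - L + 1) m) : InvA a L m := by
  obtain ⟨hl, hr, hm⟩ := h
  refine ⟨hl, hr, fun i j hi hj => ?_⟩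
  rw [hm i j hi hj]
  exact if_congr (by omega) rfl rfl

lemma outer_loop (a : List Int) (h : a ≠ []) (m : List (List Int)) (h1 : InvA a 1 m) :
    InvA a a.length ((List.range' 2 (a.length - 1)).foldl (fun dp len =>
      (List.range (a.length - len + 1)).foldl (fun dp i =>
        let j := i + len - 1
        if (Int.gcd (a.getD i 0) (a.getD j 0) : Int) = 1 then mset dp i j 2
        else
          let mo := (List.range' i (j - i)).foldl
              (fun mo k => minOpt mo (mget dp i k + mget dp (k + 1) j)) none
          mset dp i j (mo.getD 0)) dp) m) := by
  have hn : 1 ≤ a.length := by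
    cases a with
    | nil => exact absurd rfl h
    | cons x r => simp
  have main := foldl_inv (P := fun len m => InvA a (len - 1) m)
    (f := fun dp len =>
      (List.range (a.length - len + 1)).foldl (fun dp i =>
        let j := i + len - 1
        if (Int.gcd (a.getD i 0) (a.getD j 0) : Int) = 1 then mset dp i j 2
        else
          let mo := (List.range' i (j - i)).foldl
              (fun mo k => minOpt mo (mget dp i k + mget dp (k + 1) j)) none
          mset dp i j (mo.getD 0)) dp)
    2 (a.length - 1) (step := ?_) m h1
  · simp only [] at main
    rw [show (2 : Nat) + (a.length - 1) - 1 = a.length by omega] at main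
    exact main
  · intro len st hlen2 hlenlt hInv
    have hlenn : len ≤ a.length := by omega
    simp only [Nat.add_sub_cancel]
    rw [List.range_eq_range']
    apply inner_to_InvA a len hlen2 hlenn
    have hin := foldl_inv (P := fun t m => InnerInv a len t m)
      (f := fun dp i =>
          let j := i + len - 1
          if (Int.gcd (a.getD i 0) (a.getD j 0) : Int) = 1 then mset dp i j 2
          else
            let mo := (List.range' i (j - i)).foldl
                (fun mo k => minOpt mo (mget dp i k + mget dp (k + 1) j)) none
            mset dp i j (mo.getD 0)) 0 (a.length - len + 1)
      (step := fun t st' ht0 htlt hI =>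
        inner_step a len hlen2 hlenn t (by omega) st' hI)
      st (InvA_to_inner a len hlen2 st hInv)
    simpa using hin

lemma A_value (a : List Int) (h : a ≠ [])
    (hg : ((List.range' 1 (a.length - 1)).foldl
        (fun g i => (Int.gcd g (a.getD i 0) : Int)) (a.getD 0 0)) = 1) :
    findMinimumLength a = OPT (va a) 0 (a.length - 1) := by
  have hn : 1 ≤ a.length := List.length_pos_iff.mpr h
  have h2 := outer_loop a h _ (diag_loop a)
  obtain ⟨_, _, hm⟩ := h2
  simp only [findMinimumLength]
  rw [if_neg (show ¬ _ from fun hh => hh hg)]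
  rw [hm 0 (a.length - 1) (by omega) (by omega), if_pos ⟨by omega, by omega⟩]

-- === B's loop ===
def pre (a : List Int) (t : Nat) : Int := if t = 0 then 0 else OPT (va a) 0 (t - 1)

lemma B_value (a : List Int) (h : a ≠ [])
    (hg : (a.foldl (fun g x => (Int.gcd g x : Int)) 0) = 1) :
    findMinimumLength_alt a = OPT (va a) 0 (a.length - 1) := by
  have hn : 1 ≤ a.length := List.length_pos_iff.mpr h
  have hminif : ∀ (b x : Int), (if x < b then x else b) = min b x := by
    intro b x; rw [min_def]; split_ifs <;> omega
  have hpre2 : ∀ l : Nat, pre a l + 2 = cand (va a) 0 l := by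
    intro l
    by_cases h0 : l = 0 <;> simp [pre, cand, h0]
  have main := foldl_inv
    (P := fun j f => f.length = a.length + 1 ∧
      ∀ t, t < a.length + 1 → f.getD t 0 = if t ≤ j then pre a t else 0)
    (f := fun f j =>
      let best := f.getD j 0 + 1
      let best := (List.range j).foldl (fun best l =>
        if (Int.gcd (a.getD l 0) (a.getD j 0) : Int) = 1 then
          (if f.getD l 0 + 2 < best then f.getD l 0 + 2 else best)
        else best) best
      f.set (j + 1) best)
    0 a.length (step := ?_) (List.replicate (a.length + 1) 0) ?_
  · simp only [Nat.zero_add] at main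
    obtain ⟨hlen, hget⟩ := main
    have hne0 : a.length ≠ 0 := by omega
    simp only [findMinimumLength_alt]
    rw [if_neg (show ¬ _ from fun hh => hh hg), List.range_eq_range',
      hget a.length (by omega), if_pos le_rfl]
    rw [pre, if_neg hne0]
  · intro j st hj0 hjlt hP
    obtain ⟨hlen, hget⟩ := hP
    simp only []
    have hjn : j < a.length := by omega
    have hbest : (List.range j).foldl (fun best l =>
        if (Int.gcd (a.getD l 0) (a.getD j 0) : Int) = 1 then
          (if st.getD l 0 + 2 < best then st.getD l 0 + 2 else best)
        else best) (st.getD j 0 + 1) = OPT (va a) 0 j := by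
      rw [hget j (by omega), if_pos le_rfl]
      rcases Nat.eq_zero_or_pos j with hj | hj
      · subst hj
        simp [pre, OPT_diag (va a) 0 0 le_rfl]
      · have hcongr : ∀ (acc : Int), ∀ l ∈ List.range j,
            (if (Int.gcd (a.getD l 0) (a.getD j 0) : Int) = 1 then
              (if st.getD l 0 + 2 < acc then st.getD l 0 + 2 else acc)
            else acc)
            = (if ((Int.gcd (va a l) (va a j)) == 1) = true
                then min acc (cand (va a) 0 l) else acc) := by
          intro acc l hl
          have hlj : l < j := List.mem_range.mp hl
          by_cases hcop : Int.gcd (a.getD l 0) (a.getD j 0) = 1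
          · rw [hget l (by omega), if_pos (show l ≤ j by omega)]
            rw [if_pos (show ((Int.gcd (va a l) (va a j)) == 1) = true by simp only [va, beq_iff_eq]; exact hcop)]
            rw [if_pos (show (Int.gcd (a.getD l 0) (a.getD j 0) : Int) = 1 by exact_mod_cast hcop)]
            rw [hminif, hpre2 l]
          · rw [if_neg (show ¬ ((Int.gcd (va a l) (va a j)) == 1) = true by simp only [va, beq_iff_eq]; exact hcop)]
            rw [if_neg (show ¬ (Int.gcd (a.getD l 0) (a.getD j 0) : Int) = 1 from
              fun hh => hcop (by exact_mod_cast hh))]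
        rw [PySem.List.foldl_congr_mem (List.range j) _ _ _ hcongr]
        rw [← List.foldl_filter]
        rw [OPT_eq (va a) 0 j hj, List.range_eq_range']
        rw [show j - 0 = j by omega]
        congr 1
        rw [pre, if_neg (by omega)]
    rw [hbest]
    refine ⟨by rw [List.length_set]; exact hlen, ?_⟩
    intro t ht
    by_cases htj : t = j + 1
    · subst htj
      rw [List.getD_eq_getElem?_getD]
      simp [show j + 1 < st.length by omega]
      rw [pre, if_neg (by omega)]
      simp
    · rw [List.getD_eq_getElem?_getD, List.getElem?_set_ne (fun hh => htj hh.symm)]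
      rw [← List.getD_eq_getElem?_getD, hget t ht]
      congr 1
      rw [eq_iff_iff]
      omega
  · refine ⟨by simp, ?_⟩
    intro t ht
    simp only [List.getD_eq_getElem?_getD]
    rcases Nat.eq_zero_or_pos t with h0 | h0
    · subst h0
      simp [pre, show (0:Nat) < a.length + 1 by omega]
    · simp [ht, show ¬ t ≤ 0 by omega]

lemma gfold_aux : ∀ (r a : List Int) (k : Nat), a.drop k = r → ∀ (s : Int),
    (List.range' k r.length).foldl (fun g i => (Int.gcd g (a.getD i 0) : Int)) s
      = r.foldl (fun g x => (Int.gcd g x : Int)) s := by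
  intro r
  induction r with
  | nil => intro a k hk s; simp
  | cons y ys ih =>
    intro a k hk s
    rw [show (y :: ys).length = ys.length + 1 from rfl, List.range'_succ,
      List.foldl_cons, List.foldl_cons]
    have h0 : a[k]? = some y := by
      have h1 : (a.drop k)[0]? = a[k + 0]? := List.getElem?_drop
      rw [hk] at h1
      simpa using h1.symm
    have hget : a.getD k 0 = y := by simp [List.getD_eq_getElem?_getD, h0]
    have hdrop : a.drop (k + 1) = ys := by
      have h2 : (a.drop k).drop 1 = ys := by rw [hk]; rfl
      rw [List.drop_drop] at h2
      simpa [Nat.add_comm] using h2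
    rw [hget]
    exact ih a (k + 1) hdrop _

-- === the two gcd guards agree (except on [-1]) ===
lemma gcd_guards (a : List Int) (h : a ≠ []) (hd : a ≠ [-1]) :
    (((List.range' 1 (a.length - 1)).foldl
        (fun g i => (Int.gcd g (a.getD i 0) : Int)) (a.getD 0 0)) = 1 ↔
      (a.foldl (fun g x => (Int.gcd g x : Int)) 0) = 1) := by
  cases a with
  | nil => exact absurd rfl h
  | cons x r =>
    have hL : (List.range' 1 ((x :: r).length - 1)).foldl
        (fun g i => (Int.gcd g ((x :: r).getD i 0) : Int)) ((x :: r).getD 0 0)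
        = r.foldl (fun g x => (Int.gcd g x : Int)) x := by
      have := gfold_aux r (x :: r) 1 rfl x
      simpa using this
    have hR : (x :: r).foldl (fun g x => (Int.gcd g x : Int)) 0
        = r.foldl (fun g x => (Int.gcd g x : Int)) (x.natAbs : Int) := by
      simp [Int.gcd]
    rw [hL, hR]
    cases r with
    | nil =>
      simp only [List.foldl_nil]
      have hx : x ≠ -1 := fun hh => hd (by rw [hh])
      constructor <;> intro hh <;> omega
    | cons z zs =>
      rw [List.foldl_cons, List.foldl_cons]
      have : (Int.gcd x z : Int) = (Int.gcd (x.natAbs : Int) z : Int) := by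
        simp [Int.gcd, Int.natAbs_abs]
      rw [this]

-- ===== VERDICT (by name: the statement is the Claim_ definition above) =====
theorem findMinimumLength_spec : Claim_unchanged_findMinimumLength := by
  intro a _ hpre hnd
  have hne : a ≠ [] := hpre
  have hnd' : a ≠ [-1] := hnd
  by_cases hga : (List.range' 1 (a.length - 1)).foldl
      (fun g i => (Int.gcd g (a.getD i 0) : Int)) (a.getD 0 0) = 1
  · have hgb : a.foldl (fun g x => (Int.gcd g x : Int)) 0 = 1 :=
      (gcd_guards a hne hnd').mp hga
    rw [A_value a hne hga, B_value a hne hgb]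
  · have hgb : ¬ a.foldl (fun g x => (Int.gcd g x : Int)) 0 = 1 :=
      fun hh => hga ((gcd_guards a hne hnd').mpr hh)
    have hA : findMinimumLength a = -1 := by
      simp only [findMinimumLength]
      rw [if_pos hga]
    have hB : findMinimumLength_alt a = -1 := by
      simp only [findMinimumLength_alt]
      rw [if_pos hgb]
    rw [hA, hB]

theorem findMinimumLength_changed : Claim_changed_findMinimumLength := by
  unfold Claim_changed_findMinimumLength; decide

theorem findMinimumLength_tight : Claim_exact_findMinimumLength := by
  intro a _ _ hd
  unfold D_findMinimumLength at hd
  subst hd; decide
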